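-- pv_equiv track=rewrite | github.com/tinker495/PuXle | puxle/pddls/fusion/action_modifier.py | _build_type_ancestor_map
-- ===== SOURCE A (Python) =====
-- from typing import Any, Dict, List, Optional, Set, Tuple
--
-- def _build_type_ancestor_map(types_map: Dict[str, Any]) -> Dict[str, Set[str]]:
--     parent: Dict[str, str] = {}
--     for child_raw, par_raw in (types_map or {}).items():
--         child = str(child_raw)
--         if par_raw is None:
--             continue
--         par = str(par_raw)
--         if not par or par.lower() == "none":
--             continue
--         if child != par:
--             parent[child] = par
--
--     ancestors: Dict[str, Set[str]] = {}
--     all_types = set(parent.keys()) | set(parent.values()) | {"object"}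
--     for t in all_types:
--         chain: Set[str] = set()
--         seen: Set[str] = set()
--         cur = parent.get(t)
--         while cur is not None and cur not in seen:
--             chain.add(cur)
--             seen.add(cur)
--             cur = parent.get(cur)
--         ancestors[t] = chain
--
--     return ancestors
-- ===== SOURCE B (Python) =====
-- def _build_type_ancestor_map(types_map):
--     parent = {}
--     for child_raw, par_raw in (types_map or {}).items():
--         if par_raw is None:
--             continue
--         child, par = str(child_raw), str(par_raw)
--         if par and par.lower() != "none" and child != par:
--             parent[child] = par
--
--     all_types = set(parent) | set(parent.values()) | {"object"}
--     memo = {}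
--     for t in all_types:
--         if t in memo:
--             continue
--         # walk up from t until the chain ends, loops, or reaches a memoized node
--         path = [t]
--         index = {t: 0}
--         cur = parent.get(t)
--         while cur is not None and cur not in index and cur not in memo:
--             index[cur] = len(path)
--             path.append(cur)
--             cur = parent.get(cur)
--         if cur is None:
--             tail = []
--         elif cur in index:            # cycle inside the current path
--             tail = path[index[cur]:]
--         else:                         # reached an already-memoized node
--             tail = [cur] + [x for x in memo[cur] if x != cur]
--         # unwind: every node on the path gets its ancestor chain in one pass
--         for i in range(len(path) - 1, -1, -1):
--             suffix = path[i + 1:]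
--             sset = set(suffix)
--             memo[path[i]] = suffix + [x for x in tail if x not in sset]
--     return {t: set(memo[t]) for t in all_types}
-- ===== Notes on version B (the rewrite author's own statement) =====
-- stated objective: alternative
-- what changed: A re-walks the parent chain from scratch (with a fresh seen-set) for every type; B walks each parent chain only once, stopping at already-memoized nodes or in-path cycles, and then unwinds the walked path assigning every node on it its ancestor chain from the suffix plus the computed tail (memoized dynamic programming instead of independent per-node traversals).
import Mathlib
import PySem

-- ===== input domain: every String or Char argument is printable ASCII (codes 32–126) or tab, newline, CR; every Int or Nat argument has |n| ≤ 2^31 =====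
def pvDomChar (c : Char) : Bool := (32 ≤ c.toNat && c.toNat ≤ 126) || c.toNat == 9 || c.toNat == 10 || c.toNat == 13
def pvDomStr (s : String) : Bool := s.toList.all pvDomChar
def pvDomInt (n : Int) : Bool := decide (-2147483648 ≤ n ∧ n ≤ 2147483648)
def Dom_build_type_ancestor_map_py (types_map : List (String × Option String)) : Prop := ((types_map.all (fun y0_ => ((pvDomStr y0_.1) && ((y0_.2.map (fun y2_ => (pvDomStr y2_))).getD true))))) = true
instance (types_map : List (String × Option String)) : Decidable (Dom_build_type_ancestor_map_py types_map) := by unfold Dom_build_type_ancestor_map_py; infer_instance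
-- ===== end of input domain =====

-- B memoizes ancestor chains (each parent chain is walked once and unwound onto every node of the
-- walked path) instead of A's fresh chain walk per type; alternative algorithm, same exact result.

-- ===== PORT A =====
-- the input dict (association list): later duplicate keys overwrite in place, as in Python
def pvItemsA (types_map : List (String × Option String)) : List (String × Option String) :=
  (types_map.foldl (fun d kv => d.insert kv.1 kv.2)
    (PySem.Dict.empty : PySem.Dict String (Option String))).items

def pvParentStepA (d : PySem.Dict String String) (kv : String × Option String) :
    PySem.Dict String String :=
  match kv.2 with
  | none => d
  | some par =>
    if par = "" then d
    else if PySem.Str.lower par = "none" then d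
    else if kv.1 ≠ par then d.insert kv.1 par
    else d

def pvParentA (types_map : List (String × Option String)) : PySem.Dict String String :=
  (pvItemsA types_map).foldl pvParentStepA PySem.Dict.empty

-- the while loop, with fuel parent.size+1: every iteration except possibly the last adds a new
-- key of `parent` to `seen`, so the fuel is never exhausted (proved via pvReach_stable below)
def pvAwalk (parent : PySem.Dict String String) :
    Nat → Option String → PySem.Set String → PySem.Set String → PySem.Set String
  | 0, _, _, chain => chain
  | fuel+1, cur, seen, chain =>
    match cur with
    | none => chain
    | some c =>
      if PySem.Set.contains seen c then chain
      else pvAwalk parent fuel (parent.get? c) (PySem.Set.add seen c) (PySem.Set.add chain c)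

def build_type_ancestor_map_py (types_map : List (String × Option String)) :
    List (String × List String) :=
  let parent := pvParentA types_map
  let all_types : PySem.Set String :=
    PySem.Set.ofList (parent.keys ++ parent.values ++ ["object"])
  (all_types.foldl
    (fun anc t =>
      anc.insert t (pvAwalk parent (parent.size + 1) (parent.get? t) PySem.Set.empty PySem.Set.empty))
    (PySem.Dict.empty : PySem.Dict String (List String))).items

-- ===== PORT B =====
def pvItemsB (types_map : List (String × Option String)) : List (String × Option String) :=
  (types_map.foldl (fun d kv => d.insert kv.1 kv.2)
    (PySem.Dict.empty : PySem.Dict String (Option String))).items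

def pvParentStepB (d : PySem.Dict String String) (kv : String × Option String) :
    PySem.Dict String String :=
  match kv.2 with
  | some par =>
    if par ≠ "" ∧ PySem.Str.lower par ≠ "none" ∧ kv.1 ≠ par then d.insert kv.1 par else d
  | none => d

def pvParentB (types_map : List (String × Option String)) : PySem.Dict String String :=
  (pvItemsB types_map).foldl pvParentStepB PySem.Dict.empty

-- B's walk: climb from t, collecting the path, until the chain ends, loops, or reaches a
-- memoized node (the Python `index` dict is the path list: membership / first-position drop)
def pvBwalk (parent : PySem.Dict String String) (memo : PySem.Dict String (List String)) :
    Nat → Option String → List String → List String × List String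
  | 0, _, path => (path, [])
  | fuel+1, cur, path =>
    match cur with
    | none => (path, [])
    | some c =>
      if path.contains c then (path, path.dropWhile (· != c))       -- tail = path[index[cur]:]
      else
        match memo.get? c with
        | some tl => (path, c :: tl.filter (· != c))                -- tail = [cur]+…
        | none => pvBwalk parent memo fuel (parent.get? c) (path ++ [c])

-- the unwind loop, from the last path index down to 0
def pvAssign (tail : List String) :
    List String → PySem.Dict String (List String) → PySem.Dict String (List String)
  | [], memo => memo
  | node :: rest, memo =>
    (pvAssign tail rest memo).insert node (rest ++ tail.filter (fun x => !rest.contains x))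

def build_type_ancestor_map_py_alt (types_map : List (String × Option String)) :
    List (String × List String) :=
  let parent := pvParentB types_map
  let all_types : PySem.Set String :=
    PySem.Set.ofList (parent.keys ++ parent.values ++ ["object"])
  let memo := all_types.foldl
    (fun memo t =>
      if memo.contains t then memo
      else
        let r := pvBwalk parent memo (parent.size + 1) (parent.get? t) [t]
        pvAssign r.2 r.1 memo)
    (PySem.Dict.empty : PySem.Dict String (List String))
  all_types.map (fun t => (t, memo.getD t []))

-- ===== PRECONDITION & SPEC =====
def Spec_build_type_ancestor_map_py (types_map : List (String × Option String)) (out : List (String × List String)) : Prop := out = build_type_ancestor_map_py_alt types_map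
instance (types_map : List (String × Option String)) (out : List (String × List String)) : Decidable (Spec_build_type_ancestor_map_py types_map out) := by unfold Spec_build_type_ancestor_map_py; infer_instance

-- ===== CLAIM (what is proved, stated in full; the proofs are below) =====
def Claim_equal_build_type_ancestor_map_py : Prop := ∀ (types_map : List (String × Option String)), Dom_build_type_ancestor_map_py types_map → Spec_build_type_ancestor_map_py types_map (build_type_ancestor_map_py types_map)

-- ===== LEMMAS AND PROOFS =====

-- The reference chain walk: the new nodes A's while loop visits, with an explicit seen list
def pvReach (parent : PySem.Dict String String) :
    Nat → Option String → List String → List String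
  | 0, _, _ => []
  | fuel+1, cur, seen =>
    match cur with
    | none => []
    | some c => if c ∈ seen then [] else c :: pvReach parent fuel (parent.get? c) (c :: seen)

def pvChain (parent : PySem.Dict String String) (t : String) : List String :=
  pvReach parent (parent.size + 1) (parent.get? t) []

def pvLink (parent : PySem.Dict String String) (a b : String) : Prop := parent.get? a = some b

def pvInv (parent : PySem.Dict String String) (memo : PySem.Dict String (List String)) : Prop :=
  ∀ k v, memo.get? k = some v → v = pvChain parent k

def pvGood (parent : PySem.Dict String String) (path tl : List String) : Prop :=
  path.Nodup ∧ List.IsChain (pvLink parent) path ∧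
    ∀ q, path.getLast? = some q → pvChain parent q = tl

theorem pvReach_none (P : PySem.Dict String String) (f : Nat) (seen : List String) :
    pvReach P f none seen = [] := by cases f <;> rfl

theorem pvReach_some (P : PySem.Dict String String) (n : Nat) (c : String) (seen : List String) :
    pvReach P (n + 1) (some c) seen
      = if c ∈ seen then [] else c :: pvReach P n (P.get? c) (c :: seen) := rfl

theorem pvReach_stop (P : PySem.Dict String String) (f : Nat) (c : String) (seen : List String)
    (h : c ∈ seen) : pvReach P f (some c) seen = [] := by
  cases f <;> simp [pvReach, h]

theorem pvMemKeys (P : PySem.Dict String String) {c x : String} (h : P.get? c = some x) :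
    c ∈ P.keys := by
  by_contra hc
  rw [(PySem.Dict.get?_eq_none_iff_not_mem_keys P c).mpr hc] at h
  simp at h

theorem pvKeysLen (P : PySem.Dict String String) : P.keys.length = P.size := by
  simp [PySem.Dict.keys, PySem.Dict.size]

theorem pvFilterLt (l s : List String) (c : String) (hc : c ∈ l) (hcs : c ∉ s) :
    (l.filter (fun k => !(c :: s).contains k)).length <
      (l.filter (fun k => !s.contains k)).length := by
  have h1 : l.filter (fun k => !(c :: s).contains k)
      = (l.filter (fun k => !s.contains k)).filter (fun k => !(c :: s).contains k) := by
    rw [List.filter_filter]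
    apply List.filter_congr
    intro x _
    show (!(c :: s).contains x) = ((!(c :: s).contains x) && !s.contains x)
    simp only [List.contains_cons]
    cases hxc : (x == c) <;> cases hxs : s.contains x <;> rfl
  rw [h1]
  apply List.length_filter_lt_length_iff_exists.mpr
  refine ⟨c, List.mem_filter.mpr ⟨hc, ?_⟩, ?_⟩ <;> simp [hcs]

theorem pvReach_succ (P : PySem.Dict String String) :
    ∀ (f : Nat) (cur : Option String) (seen : List String),
      (P.keys.filter (fun k => !seen.contains k)).length + 1 ≤ f →
      pvReach P (f + 1) cur seen = pvReach P f cur seen := by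
  intro f
  induction f with
  | zero => intro cur seen h; omega
  | succ f ih =>
    intro cur seen h
    cases cur with
    | none => rw [pvReach_none, pvReach_none]
    | some c =>
      by_cases hc : c ∈ seen
      · rw [pvReach_stop _ _ _ _ hc, pvReach_stop _ _ _ _ hc]
      · rw [pvReach_some P (f + 1) c seen, pvReach_some P f c seen, if_neg hc, if_neg hc]
        by_cases hk : c ∈ P.keys
        · have hlt := pvFilterLt P.keys seen c hk hc
          rw [ih (P.get? c) (c :: seen) (by omega)]
        · have hnone : P.get? c = none := (PySem.Dict.get?_eq_none_iff_not_mem_keys P c).mpr hk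
          rw [hnone, pvReach_none, pvReach_none]

theorem pvReach_stable (P : PySem.Dict String String) :
    ∀ (f g : Nat) (cur : Option String) (seen : List String),
      (P.keys.filter (fun k => !seen.contains k)).length + 1 ≤ f →
      (P.keys.filter (fun k => !seen.contains k)).length + 1 ≤ g →
      pvReach P f cur seen = pvReach P g cur seen := by
  have aux : ∀ (d f : Nat) (cur : Option String) (seen : List String),
      (P.keys.filter (fun k => !seen.contains k)).length + 1 ≤ f →
      pvReach P (f + d) cur seen = pvReach P f cur seen := by
    intro d
    induction d with
    | zero => intro f cur seen _; rfl
    | succ d ih =>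
      intro f cur seen h
      have : f + (d + 1) = (f + d) + 1 := by omega
      rw [this, pvReach_succ P (f + d) cur seen (by omega), ih f cur seen h]
  intro f g cur seen hf hg
  rcases Nat.le_total f g with hle | hle
  · have : g = f + (g - f) := by omega
    rw [this, aux (g - f) f cur seen hf]
  · have : f = g + (f - g) := by omega
    rw [this, aux (f - g) g cur seen hg]

theorem pvReach_rel (P : PySem.Dict String String) :
    ∀ (f : Nat) (cur : Option String) (s s' : List String) (p : String),
      (∀ x, x ∈ s' ↔ x ∈ s ∨ x = p) →
      (∀ x, P.get? p = some x → x ∈ s ∨ cur = some x) →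
      pvReach P f cur s' = (pvReach P f cur s).filter (· != p) := by
  intro f
  induction f with
  | zero => intro cur s s' p _ _; rfl
  | succ f ih =>
    intro cur s s' p hiff hp
    cases cur with
    | none => rw [pvReach_none, pvReach_none]; rfl
    | some c =>
      by_cases hcs : c ∈ s
      · rw [pvReach_stop _ _ _ _ ((hiff c).mpr (Or.inl hcs)), pvReach_stop _ _ _ _ hcs]; rfl
      · by_cases hcp : c = p
        · subst hcp
          rw [pvReach_stop _ _ _ _ ((hiff c).mpr (Or.inr rfl))]
          show [] = (pvReach P (f + 1) (some c) s).filter (· != c)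
          rw [pvReach_some P f c s, if_neg hcs]
          have hX : pvReach P f (P.get? c) (c :: s) = [] := by
            cases hgc : P.get? c with
            | none => exact pvReach_none P f _
            | some x =>
              rcases hp x hgc with hx | hx
              · exact pvReach_stop P f x (c :: s) (List.mem_cons_of_mem c hx)
              · have : x = c := by injection hx.symm
                subst this
                exact pvReach_stop P f x (x :: s) List.mem_cons_self
          rw [hX]
          simp
        · have hcs' : c ∉ s' := by
            intro hmem
            rcases (hiff c).mp hmem with h1 | h1
            · exact hcs h1
            · exact hcp h1
          show pvReach P (f+1) (some c) s' = (pvReach P (f+1) (some c) s).filter (· != p)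
          rw [pvReach_some P f c s', pvReach_some P f c s, if_neg hcs, if_neg hcs']
          have hfc : (c != p) = true := by simp [hcp]
          simp only [List.filter_cons, hfc, if_true]
          congr 1
          apply ih
          · intro x
            constructor
            · intro hx
              rcases List.mem_cons.mp hx with h1 | h1
              · exact Or.inl (h1 ▸ List.mem_cons_self)
              · rcases (hiff x).mp h1 with h2 | h2
                · exact Or.inl (List.mem_cons_of_mem c h2)
                · exact Or.inr h2
            · intro hx
              rcases hx with h1 | h1
              · rcases List.mem_cons.mp h1 with h2 | h2
                · exact h2 ▸ List.mem_cons_self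
                · exact List.mem_cons_of_mem c ((hiff x).mpr (Or.inl h2))
              · exact List.mem_cons_of_mem c ((hiff x).mpr (Or.inr h1))
          · intro x hx
            rcases hp x hx with h1 | h1
            · exact Or.inl (List.mem_cons_of_mem c h1)
            · have : x = c := by injection h1.symm
              exact Or.inl (this ▸ List.mem_cons_self)

theorem pvChain_cons (P : PySem.Dict String String) {t p : String} (h : P.get? t = some p) :
    pvChain P t = p :: (pvChain P p).filter (· != p) := by
  unfold pvChain
  rw [h, pvReach_some P P.size p [], if_neg (by simp : ¬ p ∈ ([] : List String))]
  congr 1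
  cases hp : P.get? p with
  | none => rw [pvReach_none, pvReach_none]; rfl
  | some x =>
    have hpk : p ∈ P.keys := pvMemKeys P hp
    have hbnd : (P.keys.filter (fun k => !([p] : List String).contains k)).length + 1 ≤ P.size := by
      have h1 : (P.keys.filter (fun k => !([p] : List String).contains k)).length
          < P.keys.length := by
        apply List.length_filter_lt_length_iff_exists.mpr
        exact ⟨p, hpk, by simp⟩
      have h2 := pvKeysLen P
      omega
    rw [pvReach_stable P P.size (P.size + 1) (some x) [p] hbnd (by omega)]
    apply pvReach_rel P (P.size + 1) (some x) [] [p] p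
    · intro y; simp
    · intro y hy
      rw [hp] at hy
      exact Or.inr hy

theorem pvSeg (P : PySem.Dict String String) :
    ∀ (v : List String) (c : String) (f : Nat) (s : List String),
      List.IsChain (pvLink P) (c :: v) → (c :: v).Nodup → (∀ x ∈ c :: v, x ∉ s) →
      (∀ q z, (c :: v).getLast? = some q → P.get? q = some z → z ∈ s ∨ z ∈ c :: v) →
      (c :: v).length ≤ f →
      pvReach P f (some c) s = c :: v := by
  intro v
  induction v with
  | nil =>
    intro c f s hch hnd hdisj hstop hf
    obtain ⟨f', rfl⟩ : ∃ f', f = f' + 1 := ⟨f - 1, by simp at hf; omega⟩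
    rw [pvReach_some, if_neg (hdisj c List.mem_cons_self)]
    congr 1
    cases hgc : P.get? c with
    | none => exact pvReach_none P f' _
    | some z =>
      rcases hstop c z rfl hgc with hz | hz
      · exact pvReach_stop P f' z (c :: s) (List.mem_cons_of_mem c hz)
      · have hzc : z = c := by simpa using hz
        exact pvReach_stop P f' z (c :: s) (hzc ▸ List.mem_cons_self)
  | cons c' v' ih =>
    intro c f s hch hnd hdisj hstop hf
    obtain ⟨f', rfl⟩ : ∃ f', f = f' + 1 := ⟨f - 1, by simp at hf; omega⟩
    rw [pvReach_some, if_neg (hdisj c List.mem_cons_self)]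
    have hlink : P.get? c = some c' := (List.isChain_cons_cons.mp hch).1
    rw [hlink]
    congr 1
    apply ih c' f' (c :: s) (List.isChain_cons_cons.mp hch).2 (List.nodup_cons.mp hnd).2
    · intro x hx hmem
      rcases List.mem_cons.mp hmem with h1 | h1
      · exact (List.nodup_cons.mp hnd).1 (h1 ▸ hx)
      · exact hdisj x (List.mem_cons_of_mem c hx) h1
    · intro q z hq hz
      rcases hstop q z (by rw [List.getLast?_cons_cons]; exact hq) hz with h1 | h1
      · exact Or.inl (List.mem_cons_of_mem c h1)
      · rcases List.mem_cons.mp h1 with h2 | h2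
        · exact Or.inl (h2 ▸ List.mem_cons_self)
        · exact Or.inr h2
    · simp at hf ⊢; omega

theorem pvSplit : ∀ (l : List String) (c : String), c ∈ l →
    ∃ u v, l = u ++ c :: v ∧ l.dropWhile (· != c) = c :: v := by
  intro l
  induction l with
  | nil => intro c hc; cases hc
  | cons a l' ih =>
    intro c hc
    by_cases hac : a = c
    · subst hac
      refine ⟨[], l', rfl, ?_⟩
      rw [List.dropWhile_cons_of_neg (by simp)]
    · have hc' : c ∈ l' := by
        rcases List.mem_cons.mp hc with h1 | h1
        · exact absurd h1.symm hac
        · exact h1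
      obtain ⟨u, v, h1, h2⟩ := ih c hc'
      refine ⟨a :: u, v, by rw [h1]; rfl, ?_⟩
      rw [List.dropWhile_cons_of_pos (by simp [hac]), h2]

theorem pvPathLen (P : PySem.Dict String String) (l : List String)
    (hc : List.IsChain (pvLink P) l) (hn : l.Nodup) : l.length ≤ P.size + 1 := by
  have haux : ∀ (m : List String), List.IsChain (pvLink P) m → ∀ x ∈ m.dropLast, x ∈ P.keys := by
    intro m
    induction m with
    | nil => intro _ x hx; cases hx
    | cons a m' ih =>
      intro hch x hx
      cases m' with
      | nil => cases hx
      | cons b m'' =>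
        have h1 := List.isChain_cons_cons.mp hch
        have hdl : (a :: b :: m'').dropLast = a :: (b :: m'').dropLast := rfl
        rw [hdl] at hx
        rcases List.mem_cons.mp hx with h2 | h2
        · exact h2 ▸ pvMemKeys P h1.1
        · exact ih h1.2 x h2
  have hnd : l.dropLast.Nodup := hn.sublist (List.dropLast_sublist l)
  have hsub : l.dropLast ⊆ P.keys := fun x hx => haux l hc x hx
  have hle : l.dropLast.length ≤ P.keys.length := (hnd.subperm hsub).length_le
  have h2 := pvKeysLen P
  have h3 : l.dropLast.length = l.length - 1 := List.length_dropLast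
  omega

theorem pvBwalk_none (P : PySem.Dict String String) (M : PySem.Dict String (List String))
    (f : Nat) (path : List String) : pvBwalk P M (f + 1) none path = (path, []) := rfl

theorem pvBwalk_any_none (P : PySem.Dict String String) (M : PySem.Dict String (List String))
    (f : Nat) (path : List String) : pvBwalk P M f none path = (path, []) := by
  cases f <;> rfl

theorem pvBwalk_some (P : PySem.Dict String String) (M : PySem.Dict String (List String))
    (f : Nat) (c : String) (path : List String) :
    pvBwalk P M (f + 1) (some c) path =
      if path.contains c then (path, path.dropWhile (· != c))
      else
        match M.get? c with
        | some tl => (path, c :: tl.filter (· != c))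
        | none => pvBwalk P M f (P.get? c) (path ++ [c]) := rfl

theorem pvBwalk_spec (P : PySem.Dict String String) (M : PySem.Dict String (List String))
    (hM : pvInv P M) :
    ∀ (f : Nat) (path : List String) (q : String),
      path ≠ [] → path.Nodup → List.IsChain (pvLink P) path → path.getLast? = some q →
      (P.keys.filter (fun k => !path.contains k)).length + 1 ≤ f →
      ∃ path' tl, pvBwalk P M f (P.get? q) path = (path', tl) ∧ pvGood P path' tl ∧
        path' ≠ [] ∧ ∀ x ∈ path, x ∈ path' := by
  intro f
  induction f with
  | zero => intro path q _ _ _ _ hf; omega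
  | succ f ih =>
    intro path q hne hnd hch hlast hf
    cases hcur : P.get? q with
    | none =>
      refine ⟨path, [], pvBwalk_none P M f path, ⟨hnd, hch, ?_⟩, hne, fun x hx => hx⟩
      intro q' hq'
      have hq'q : q' = q := by rw [hlast] at hq'; injection hq' with hh; exact hh.symm
      subst hq'q
      unfold pvChain
      rw [hcur, pvReach_none]
    | some c =>
      rw [pvBwalk_some]
      by_cases hcp : path.contains c
      · rw [if_pos hcp]
        have hcmem : c ∈ path := by simpa using hcp
        obtain ⟨u, v, hdecomp, hdrop⟩ := pvSplit path c hcmem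
        rw [hdrop]
        refine ⟨path, c :: v, rfl, ⟨hnd, hch, ?_⟩, hne, fun x hx => hx⟩
        intro q' hq'
        have hq'q : q' = q := by rw [hlast] at hq'; injection hq' with hh; exact hh.symm
        subst hq'q
        have hchcv : List.IsChain (pvLink P) (c :: v) := by
          rw [hdecomp] at hch; exact hch.right_of_append
        have hndcv : (c :: v).Nodup := by
          rw [hdecomp] at hnd; exact (List.nodup_append.mp hnd).2.1
        have hlastcv : (c :: v).getLast? = some q' := by
          rw [hdecomp] at hlast
          rw [List.getLast?_append] at hlast
          cases hcv : (c :: v).getLast? with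
          | none => rw [List.getLast?_eq_none_iff] at hcv; cases hcv
          | some w => rw [hcv] at hlast; simp at hlast; rw [hlast]
        unfold pvChain
        rw [hcur]
        apply pvSeg P v c (P.size + 1) [] hchcv hndcv (by simp) ?_ ?_
        · intro q2 z hq2 hz
          have hq2q : q2 = q' := by rw [hlastcv] at hq2; injection hq2 with hh; exact hh.symm
          subst hq2q
          rw [hcur] at hz
          have hzc : z = c := by injection hz with hh; exact hh.symm
          exact Or.inr (hzc ▸ List.mem_cons_self)
        · exact pvPathLen P (c :: v) hchcv hndcv
      · rw [if_neg hcp]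
        have hcnp : c ∉ path := by simpa using hcp
        cases hmc : M.get? c with
        | some tl =>
          refine ⟨path, c :: tl.filter (· != c), rfl, ⟨hnd, hch, ?_⟩, hne, fun x hx => hx⟩
          intro q' hq'
          have hq'q : q' = q := by rw [hlast] at hq'; injection hq' with hh; exact hh.symm
          subst hq'q
          rw [pvChain_cons P hcur, hM c tl hmc]
        | none =>
          have hch' : List.IsChain (pvLink P) (path ++ [c]) := by
            apply List.isChain_append.mpr
            refine ⟨hch, by simp, ?_⟩
            intro x hx y hy
            simp at hy
            rw [hlast] at hx
            simp at hx
            subst hy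
            subst hx
            exact hcur
          have hnd' : (path ++ [c]).Nodup := by
            rw [List.nodup_append]
            refine ⟨hnd, List.nodup_singleton c, ?_⟩
            intro a ha b hb
            simp at hb
            exact fun hab => hcnp ((hab.trans hb) ▸ ha)
          have hlast' : (path ++ [c]).getLast? = some c := List.getLast?_concat
          by_cases hk : c ∈ P.keys
          · have he : P.keys.filter (fun k => !(path ++ [c]).contains k)
                = P.keys.filter (fun k => !(c :: path).contains k) := by
              apply List.filter_congr
              intro x _
              show (!(path ++ [c]).contains x) = (!(c :: path).contains x)
              simp only [List.contains_append, List.contains_cons]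
              cases hx1 : path.contains x <;> cases hx2 : (x == c) <;> rfl
            have hbound : (P.keys.filter (fun k => !(path ++ [c]).contains k)).length + 1 ≤ f := by
              rw [he]
              have := pvFilterLt P.keys path c hk hcnp
              omega
            obtain ⟨path', tl, heq, hgood, hne', hsub⟩ :=
              ih (path ++ [c]) c (by simp) hnd' hch' hlast' hbound
            exact ⟨path', tl, heq, hgood, hne', fun x hx => hsub x (List.mem_append_left _ hx)⟩
          · have hgc : P.get? c = none := (PySem.Dict.get?_eq_none_iff_not_mem_keys P c).mpr hk
            rw [hgc, pvBwalk_any_none]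
            refine ⟨path ++ [c], [], rfl, ⟨hnd', hch', ?_⟩, by simp, fun x hx => List.mem_append_left _ hx⟩
            intro q' hq'
            have hq'c : q' = c := by rw [hlast'] at hq'; injection hq' with hh; exact hh.symm
            subst hq'c
            unfold pvChain
            rw [hgc, pvReach_none]

theorem pvChain_of_good (P : PySem.Dict String String) :
    ∀ (rest : List String) (node : String) (tl : List String),
      pvGood P (node :: rest) tl →
      pvChain P node = rest ++ tl.filter (fun x => !rest.contains x) := by
  intro rest
  induction rest with
  | nil =>
    intro node tl hg
    have h := hg.2.2 node rfl
    simpa using h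
  | cons q rest' ih =>
    intro node tl hg
    obtain ⟨hnd, hch, hlast⟩ := hg
    have hlink : P.get? node = some q := (List.isChain_cons_cons.mp hch).1
    have hg' : pvGood P (q :: rest') tl :=
      ⟨hnd.of_cons, (List.isChain_cons_cons.mp hch).2,
        fun q' hq' => hlast q' (by rw [List.getLast?_cons_cons]; exact hq')⟩
    have hq := ih q tl hg'
    rw [pvChain_cons P hlink, hq, List.filter_append]
    have hqnr : q ∉ rest' := (List.nodup_cons.mp hnd.of_cons).1
    have h1 : rest'.filter (· != q) = rest' := by
      apply List.filter_eq_self.mpr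
      intro x hx
      simp only [bne_iff_ne, ne_eq]
      exact fun hxq => hqnr (hxq ▸ hx)
    have h2 : (tl.filter (fun x => !rest'.contains x)).filter (· != q)
        = tl.filter (fun x => !(q :: rest').contains x) := by
      rw [List.filter_filter]
      apply List.filter_congr
      intro x _
      show ((x != q) && !rest'.contains x) = (!(q :: rest').contains x)
      simp only [List.contains_cons, bne]
      cases hx1 : (x == q) <;> cases hx2 : rest'.contains x <;> rfl
    rw [h1, h2]
    rfl

theorem pvAssign_spec (P : PySem.Dict String String) :
    ∀ (path tl : List String) (M : PySem.Dict String (List String)),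
      pvGood P path tl → pvInv P M →
      pvInv P (pvAssign tl path M) ∧
      (∀ x ∈ path, ((pvAssign tl path M).get? x).isSome) ∧
      (∀ k : String, (M.get? k).isSome → ((pvAssign tl path M).get? k).isSome) := by
  intro path
  induction path with
  | nil => intro tl M _ hInv; exact ⟨hInv, by simp, fun _ h => h⟩
  | cons node rest ih =>
    intro tl M hg hInv
    obtain ⟨hnd, hch, hlast⟩ := hg
    have hg' : pvGood P rest tl := by
      refine ⟨hnd.of_cons, hch.tail, ?_⟩
      intro q hq
      apply hlast q
      cases rest with
      | nil => cases hq
      | cons b r => rw [List.getLast?_cons_cons]; exact hq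
    obtain ⟨hInv', hSome', hPres'⟩ := ih tl M hg' hInv
    have hval := pvChain_of_good P rest node tl ⟨hnd, hch, hlast⟩
    refine ⟨?_, ?_, ?_⟩
    · intro k v hk
      show v = pvChain P k
      have hk' : ((pvAssign tl rest M).insert node
          (rest ++ tl.filter (fun x => !rest.contains x))).get? k = some v := hk
      rw [PySem.Dict.get?_insert] at hk'
      by_cases hkn : k = node
      · rw [if_pos hkn] at hk'
        have hv : v = rest ++ tl.filter (fun x => !rest.contains x) := by injection hk'.symm
        rw [hv, hkn, hval]
      · rw [if_neg hkn] at hk'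
        exact hInv' k v hk'
    · intro x hx
      show (((pvAssign tl rest M).insert node
          (rest ++ tl.filter (fun x => !rest.contains x))).get? x).isSome
      rw [PySem.Dict.get?_insert]
      by_cases hxn : x = node
      · rw [if_pos hxn]; rfl
      · rw [if_neg hxn]
        rcases List.mem_cons.mp hx with h | h
        · exact absurd h hxn
        · exact hSome' x h
    · intro k hk
      show (((pvAssign tl rest M).insert node
          (rest ++ tl.filter (fun x => !rest.contains x))).get? k).isSome
      rw [PySem.Dict.get?_insert]
      by_cases hkn : k = node
      · rw [if_pos hkn]; rfl
      · rw [if_neg hkn]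
        exact hPres' k hk

theorem pvFold_spec (P : PySem.Dict String String) :
    ∀ (l : List String) (M : PySem.Dict String (List String)), pvInv P M →
      pvInv P (l.foldl
        (fun memo t =>
          if memo.contains t then memo
          else pvAssign (pvBwalk P memo (P.size + 1) (P.get? t) [t]).2
            (pvBwalk P memo (P.size + 1) (P.get? t) [t]).1 memo) M) ∧
      (∀ t ∈ l, ((l.foldl
        (fun memo t =>
          if memo.contains t then memo
          else pvAssign (pvBwalk P memo (P.size + 1) (P.get? t) [t]).2
            (pvBwalk P memo (P.size + 1) (P.get? t) [t]).1 memo) M).get? t).isSome) ∧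
      (∀ k : String, (M.get? k).isSome → ((l.foldl
        (fun memo t =>
          if memo.contains t then memo
          else pvAssign (pvBwalk P memo (P.size + 1) (P.get? t) [t]).2
            (pvBwalk P memo (P.size + 1) (P.get? t) [t]).1 memo) M).get? k).isSome) := by
  intro l
  induction l with
  | nil =>
    intro M hInv
    refine ⟨hInv, ?_, fun _ h => h⟩
    intro t ht
    cases ht
  | cons t0 l' ih =>
    intro M hInv
    rw [List.foldl_cons]
    have hstep : pvInv P (if M.contains t0 then M
          else pvAssign (pvBwalk P M (P.size + 1) (P.get? t0) [t0]).2
            (pvBwalk P M (P.size + 1) (P.get? t0) [t0]).1 M) ∧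
        (((if M.contains t0 then M
          else pvAssign (pvBwalk P M (P.size + 1) (P.get? t0) [t0]).2
            (pvBwalk P M (P.size + 1) (P.get? t0) [t0]).1 M)).get? t0).isSome ∧
        (∀ k : String, (M.get? k).isSome → (((if M.contains t0 then M
          else pvAssign (pvBwalk P M (P.size + 1) (P.get? t0) [t0]).2
            (pvBwalk P M (P.size + 1) (P.get? t0) [t0]).1 M)).get? k).isSome) := by
      by_cases hc : M.contains t0 = true
      · rw [if_pos hc]
        refine ⟨hInv, ?_, fun _ h => h⟩
        rw [← PySem.Dict.contains_eq_isSome_get?]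
        exact hc
      · rw [if_neg hc]
        obtain ⟨path', tl, heq, hgood, hne', hsub⟩ :=
          pvBwalk_spec P M hInv (P.size + 1) [t0] t0 (by simp) (by simp) (by simp) rfl
            (by have h1 := List.length_filter_le (fun k => !([t0] : List String).contains k) P.keys
                have h2 := pvKeysLen P
                omega)
        rw [heq]
        obtain ⟨hI, hS, hPr⟩ := pvAssign_spec P path' tl M hgood hInv
        exact ⟨hI, hS t0 (hsub t0 (by simp)), fun k hk => hPr k hk⟩
      -- (branch structure note: `if` on the Bool `M.contains t0`)
    obtain ⟨hI1, hS1, hP1⟩ := hstep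
    obtain ⟨hI2, hS2, hP2⟩ := ih _ hI1
    refine ⟨hI2, ?_, fun k hk => hP2 k (hP1 k hk)⟩
    intro t ht
    rcases List.mem_cons.mp ht with h | h
    · exact h ▸ hP2 t0 hS1
    · exact hS2 t h

theorem pvAwalk_some (P : PySem.Dict String String) (f : Nat) (c : String)
    (seen chain : PySem.Set String) :
    pvAwalk P (f + 1) (some c) seen chain =
      if PySem.Set.contains seen c then chain
      else pvAwalk P f (P.get? c) (PySem.Set.add seen c) (PySem.Set.add chain c) := rfl

theorem pvAwalk_eq_reach (P : PySem.Dict String String) :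
    ∀ (f : Nat) (cur : Option String) (s s' : List String),
      (∀ x, x ∈ s ↔ x ∈ s') →
      pvAwalk P f cur s s = s ++ pvReach P f cur s' := by
  intro f
  induction f with
  | zero => intro cur s s' _; show s = s ++ []; simp
  | succ f ih =>
    intro cur s s' hiff
    cases cur with
    | none => show s = s ++ pvReach P (f + 1) none s'; rw [pvReach_none]; simp
    | some c =>
      rw [pvAwalk_some, pvReach_some]
      by_cases hc : c ∈ s'
      · rw [if_pos ((PySem.Set.contains_iff s c).mpr ((hiff c).mpr hc)), if_pos hc]
        simp
      · have hcns : c ∉ s := fun h => hc ((hiff c).mp h)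
        rw [if_neg (fun h => hcns ((PySem.Set.contains_iff s c).mp h)), if_neg hc]
        rw [PySem.Set.add_of_not_mem hcns]
        rw [ih (P.get? c) (s ++ [c]) (c :: s')
          (by intro x; simp only [List.mem_append, List.mem_cons]; have := hiff x; tauto)]
        rw [List.append_assoc]
        rfl

theorem pvItems_fold (f : String → List String) :
    ∀ (l : List String) (d : PySem.Dict String (List String)),
      l.Nodup → (∀ a ∈ l, d.contains a = false) →
      (l.foldl (fun anc t => anc.insert t (f t)) d).items = d.items ++ l.map (fun t => (t, f t)) := by
  intro l
  induction l with
  | nil => intro d _ _; simp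
  | cons a l' ih =>
    intro d hnd hfresh
    rw [List.foldl_cons]
    rw [ih (d.insert a (f a)) (List.nodup_cons.mp hnd).2 ?_]
    · rw [PySem.Dict.items_insert_of_not_contains d (f a) (hfresh a List.mem_cons_self)]
      simp
    · intro b hb
      rw [PySem.Dict.contains_insert]
      have hba : (b == a) = false := by
        simp only [beq_eq_false_iff_ne, ne_eq]
        exact fun h => (List.nodup_cons.mp hnd).1 (h ▸ hb)
      rw [hba, hfresh b (List.mem_cons_of_mem a hb)]
      rfl

theorem pvParentB_eq (types_map : List (String × Option String)) :
    pvParentB types_map = pvParentA types_map := by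
  have hstep : pvParentStepB = pvParentStepA := by
    funext d kv
    unfold pvParentStepB pvParentStepA
    cases h2 : kv.2 with
    | none => rfl
    | some par =>
      by_cases h1 : par = ""
      · simp [h1]
      · by_cases hl : PySem.Str.lower par = "none"
        · simp [h1, hl]
        · by_cases hc : kv.1 = par
          · simp [h1, hl, hc]
          · simp [h1, hl, hc]
  show (pvItemsB types_map).foldl pvParentStepB PySem.Dict.empty
      = (pvItemsA types_map).foldl pvParentStepA PySem.Dict.empty
  rw [hstep]
  rfl

-- ===== VERDICT (by name: the statement is the Claim_ definition above) =====
theorem build_type_ancestor_map_py_spec : Claim_equal_build_type_ancestor_map_py := by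
  intro types_map _hDom
  show build_type_ancestor_map_py types_map = build_type_ancestor_map_py_alt types_map
  simp only [build_type_ancestor_map_py, build_type_ancestor_map_py_alt, pvParentB_eq]
  set P := pvParentA types_map with hP
  set allT := PySem.Set.ofList (P.keys ++ P.values ++ ["object"]) with hallT
  rw [pvItems_fold (fun t => pvAwalk P (P.size + 1) (P.get? t) PySem.Set.empty PySem.Set.empty)
      allT PySem.Dict.empty (PySem.Set.nodup_ofList _) (fun a _ => by
        rw [PySem.Dict.contains_eq_isSome_get?, PySem.Dict.get?_empty]; rfl)]
  have hInv0 : pvInv P PySem.Dict.empty := by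
    intro k v hk
    rw [PySem.Dict.get?_empty] at hk
    cases hk
  obtain ⟨hI, hS, _⟩ := pvFold_spec P allT PySem.Dict.empty hInv0
  have hitems : (PySem.Dict.empty : PySem.Dict String (List String)).items = [] := rfl
  rw [hitems, List.nil_append]
  apply List.map_congr_left
  intro t ht
  obtain ⟨v, hv⟩ := Option.isSome_iff_exists.mp (hS t ht)
  have hvc : v = pvChain P t := hI t v hv
  rw [PySem.Dict.getD_eq_get?_getD, hv]
  have hwalk : pvAwalk P (P.size + 1) (P.get? t) PySem.Set.empty PySem.Set.empty
      = pvChain P t := by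
    rw [pvAwalk_eq_reach P (P.size + 1) (P.get? t) PySem.Set.empty []
      (by intro x; simp [PySem.Set.empty])]
    rfl
  rw [hwalk, hvc]
  rfl
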